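-- pv_equiv track=rewrite | github.com/6reg/pc_func_fun | aba4.py | aba
-- ===== SOURCE A (Python) =====
-- def aba(s):
--     new = ''
--     v = 'aeiouAEIOU'
--     for i in s:
--         if i in v:
--             new += i + "b" + i.lower()
--         else:
--             new += i
--     return new
-- ===== SOURCE B (Python) =====
-- import re
--
-- def aba(s):
--     return re.sub(r'[aeiouAEIOU]', lambda m: m.group(0) + 'b' + m.group(0).lower(), s)
-- ===== Notes on version B (the rewrite author's own statement) =====
-- stated objective: idiomatic
-- what changed: Replaces the explicit per-character accumulator loop by a single re.sub pattern pass with a callback producing match+'b'+lowered match.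
import Mathlib
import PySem

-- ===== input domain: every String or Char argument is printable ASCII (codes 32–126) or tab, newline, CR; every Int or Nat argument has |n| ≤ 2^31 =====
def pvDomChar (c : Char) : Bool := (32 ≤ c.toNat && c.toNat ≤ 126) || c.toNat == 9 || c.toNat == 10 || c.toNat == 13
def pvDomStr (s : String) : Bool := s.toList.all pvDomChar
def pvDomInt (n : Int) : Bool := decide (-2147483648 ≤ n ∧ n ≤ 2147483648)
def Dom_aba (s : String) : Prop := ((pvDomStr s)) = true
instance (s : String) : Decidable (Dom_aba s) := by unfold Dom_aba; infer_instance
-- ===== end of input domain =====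

-- B replaces A's per-character accumulator loop by a single regex-substitution pass
-- (each vowel match replaced by match+'b'+lowered match); idiomatic, same result.

-- ===== PORT A =====
-- literal port: fold over the characters with a String accumulator,
-- appending i+"b"+i.lower() for vowels, i otherwise
def aba (s : String) : String :=
  s.toList.foldl
    (fun new i =>
      if i ∈ "aeiouAEIOU".toList then
        new ++ String.ofList [i] ++ "b" ++ String.ofList [PySem.Chars.lowerChar i]
      else new ++ String.ofList [i])
    ""

-- ===== PORT B =====
-- port of Source B's re.sub pass: the regex engine scans once, emitting for each
-- vowel match the callback's replacement piece and copying non-matching chars;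
-- modelled as a flatMap producing the pieces, joined into the result string.
def abaSubPiece (c : Char) : List Char :=
  if c ∈ "aeiouAEIOU".toList then [c, 'b', PySem.Chars.lowerChar c] else [c]

def aba_alt (s : String) : String :=
  String.ofList (s.toList.flatMap abaSubPiece)

-- ===== PRECONDITION & SPEC =====
def Spec_aba (s : String) (out : String) : Prop := out = aba_alt s
instance (s : String) (out : String) : Decidable (Spec_aba s out) := by unfold Spec_aba; infer_instance

-- ===== CLAIM (what is proved, stated in full; the proofs are below) =====
def Claim_equal_aba : Prop := ∀ (s : String), Dom_aba s → Spec_aba s (aba s)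

-- ===== LEMMAS AND PROOFS =====
lemma aba_foldl (l : List Char) (acc : String) :
    l.foldl
      (fun new i =>
        if i ∈ "aeiouAEIOU".toList then
          new ++ String.ofList [i] ++ "b" ++ String.ofList [PySem.Chars.lowerChar i]
        else new ++ String.ofList [i])
      acc = acc ++ String.ofList (l.flatMap abaSubPiece) := by
  induction l generalizing acc with
  | nil => simp
  | cons c t ih =>
    simp only [List.foldl_cons, List.flatMap_cons, ih, abaSubPiece]
    split_ifs with h <;> simp [String.ext_iff]

-- ===== VERDICT (by name: the statement is the Claim_ definition above) =====
theorem aba_spec : Claim_equal_aba := by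
  intro s _
  show aba s = aba_alt s
  unfold aba aba_alt
  rw [aba_foldl]
  simp
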